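-- pv_equiv track=rewrite | github.com/xiaobin666/test | Scripts/2-2.py | last_char_index
-- ===== SOURCE A (Python) =====
-- def last_char_index(str,j):
--     index = 0
--     last_index = 0
--     for i in str:
--         if i==j:
--             last_index = index
--         index = index + 1
--     return last_index
-- ===== SOURCE B (Python) =====
-- def last_char_index(str, j):
--     for i in range(len(str) - 1, -1, -1):
--         if str[i] == j:
--             return i
--     return 0
-- ===== Notes on version B (the rewrite author's own statement) =====
-- stated objective: alternative
-- what changed: B scans the string backwards and returns on the first hit (early exit) instead of A's forward accumulate-then-return of the last match; the 0-if-absent result is preserved.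
import Mathlib
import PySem

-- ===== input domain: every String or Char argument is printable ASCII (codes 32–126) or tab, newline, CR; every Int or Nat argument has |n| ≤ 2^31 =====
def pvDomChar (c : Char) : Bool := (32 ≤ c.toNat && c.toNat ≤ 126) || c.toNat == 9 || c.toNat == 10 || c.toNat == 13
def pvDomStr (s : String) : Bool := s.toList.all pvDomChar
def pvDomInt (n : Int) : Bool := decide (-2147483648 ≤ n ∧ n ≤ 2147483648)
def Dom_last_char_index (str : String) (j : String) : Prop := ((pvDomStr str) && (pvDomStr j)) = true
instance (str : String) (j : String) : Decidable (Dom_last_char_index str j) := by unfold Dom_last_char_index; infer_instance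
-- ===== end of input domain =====

-- B scans backwards with early return instead of A's forward accumulation; same result, 0 if absent.

-- ===== PORT A =====
-- forward loop: index counter and last_index accumulator, updated exactly as in the Python
def last_char_index (str : String) (j : String) : Int :=
  (str.toList.foldl
    (fun (st : Int × Int) i =>
      (st.1 + 1, if String.ofList [i] = j then st.1 else st.2))
    (0, 0)).2

-- ===== PORT B =====
-- backward scan over range(len-1, -1, -1): first match wins, 0 if the loop finishes
def lciGo (j : String) : List Char → Int → Int
  | [], _ => 0
  | c :: rest, i => if String.ofList [c] = j then i else lciGo j rest (i - 1)

def last_char_index_alt (str : String) (j : String) : Int :=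
  lciGo j str.toList.reverse ((str.toList.length : Int) - 1)

-- ===== PRECONDITION & SPEC =====
def Spec_last_char_index (str : String) (j : String) (out : Int) : Prop := out = last_char_index_alt str j
instance (str : String) (j : String) (out : Int) : Decidable (Spec_last_char_index str j out) := by unfold Spec_last_char_index; infer_instance

-- ===== CLAIM (what is proved, stated in full; the proofs are below) =====
def Claim_equal_last_char_index : Prop := ∀ (str : String) (j : String), Dom_last_char_index str j → Spec_last_char_index str j (last_char_index str j)

-- ===== LEMMAS AND PROOFS =====

theorem lci_fst (j : String) (l : List Char) (st : Int × Int) :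
    (l.foldl (fun (st : Int × Int) i =>
      (st.1 + 1, if String.ofList [i] = j then st.1 else st.2)) st).1 = st.1 + l.length := by
  induction l generalizing st with
  | nil => simp
  | cons c t ih => simp [List.foldl, ih]; omega

theorem lci_main (j : String) (l : List Char) :
    (l.foldl (fun (st : Int × Int) i =>
      (st.1 + 1, if String.ofList [i] = j then st.1 else st.2)) (0, 0)).2
      = lciGo j l.reverse ((l.length : Int) - 1) := by
  induction l using List.reverseRecOn with
  | nil => simp [lciGo]
  | append_singleton l c ih =>
    rw [List.foldl_append]
    simp only [List.foldl, List.reverse_append, List.reverse_singleton, List.length_append,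
      List.length_singleton, List.singleton_append, lciGo]
    by_cases h : String.ofList [c] = j
    · simp [h, lci_fst]
    · simp [h, ih]

-- ===== VERDICT (by name: the statement is the Claim_ definition above) =====
theorem last_char_index_spec : Claim_equal_last_char_index := by
  intro str j _
  unfold Spec_last_char_index last_char_index last_char_index_alt
  exact lci_main j str.toList
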